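-- pv_equiv track=rewrite | github.com/Cheater115/acmp | Python/0942.py | getKoef
-- ===== SOURCE A (Python) =====
-- def getKoef(times, timeLimit):
--     cnt = 0
--     time = 0
--     penalty = 0
--     for i in range(len(times)):
--         if time + times[i] > timeLimit:
--             break
--         cnt += 1
--         time += times[i]
--         penalty += time
--     return 10000 * (cnt + 1) - penalty
-- ===== SOURCE B (Python) =====
-- def getKoef(times, timeLimit):
--     # Selection pass: spend the remaining budget greedily; no prefix sums kept.
--     budget = timeLimit
--     stack = []
--     for t in times:
--         if t > budget:
--             break
--         stack.append(t)
--         budget -= t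
--     # Scoring pass: pop solved tasks in LIFO order; the k-th task from the end
--     # of the solved run delays exactly k tasks' finishes, so it costs k * t.
--     score = 10000
--     rank = 0
--     while stack:
--         rank += 1
--         score += 10000 - rank * stack.pop()
--     return score
-- ===== Notes on version B (the rewrite author's own statement) =====
-- stated objective: alternative
-- what changed: Instead of accumulating running time and penalty with a break, B selects solved tasks by decrementing a remaining budget onto a stack, then scores them in a second LIFO pass where the k-th task from the end of the solved run costs k times its duration (no prefix sums or penalty accumulator anywhere).
import Mathlib
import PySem

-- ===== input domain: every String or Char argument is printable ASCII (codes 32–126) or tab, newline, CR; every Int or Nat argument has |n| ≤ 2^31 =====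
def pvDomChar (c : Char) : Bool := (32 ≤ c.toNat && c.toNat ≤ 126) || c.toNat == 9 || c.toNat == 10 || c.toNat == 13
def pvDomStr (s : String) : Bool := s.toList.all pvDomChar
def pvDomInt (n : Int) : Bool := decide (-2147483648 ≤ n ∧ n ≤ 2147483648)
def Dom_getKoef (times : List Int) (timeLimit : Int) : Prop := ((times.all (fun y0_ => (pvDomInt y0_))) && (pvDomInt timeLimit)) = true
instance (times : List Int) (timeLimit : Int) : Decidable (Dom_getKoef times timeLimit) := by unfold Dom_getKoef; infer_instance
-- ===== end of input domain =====

-- B replaces A's fused running-time/penalty accumulation by two passes: a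
-- budget-decrementing selection onto a stack, then a LIFO scoring pass where the
-- k-th-from-last solved task costs k times its duration; same cost, different algorithm.

-- ===== PORT A =====
-- the for-loop over times with state (cnt, time, penalty); break = stop the recursion
def getKoefLoop (timeLimit : Int) : List Int → Int → Int → Int → Int × Int
  | [], cnt, _, penalty => (cnt, penalty)
  | t :: rest, cnt, time, penalty =>
    if time + t > timeLimit then (cnt, penalty)
    else getKoefLoop timeLimit rest (cnt + 1) (time + t) (penalty + (time + t))

def getKoef (times : List Int) (timeLimit : Int) : Int :=
  let r := getKoefLoop timeLimit times 0 0 0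
  10000 * (r.1 + 1) - r.2

-- ===== PORT B =====
-- selection pass: 'for t in times: if t > budget: break; stack.append(t); budget -= t'
def pvStack : Int → List Int → List Int → List Int
  | _, stack, [] => stack
  | budget, stack, t :: rest =>
    if t > budget then stack else pvStack (budget - t) (stack ++ [t]) rest

-- scoring pass: 'while stack: rank += 1; score += 10000 - rank * stack.pop()';
-- popping from the end of the stack = structural recursion over the reversed stack
def pvPopLoop : List Int → Int → Int → Int
  | [], _, score => score
  | t :: rest, rank, score => pvPopLoop rest (rank + 1) (score + 10000 - (rank + 1) * t)

def getKoef_alt (times : List Int) (timeLimit : Int) : Int :=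
  pvPopLoop (pvStack timeLimit [] times).reverse 0 10000

-- ===== PRECONDITION & SPEC =====
def Spec_getKoef (times : List Int) (timeLimit : Int) (out : Int) : Prop := out = getKoef_alt times timeLimit
instance (times : List Int) (timeLimit : Int) (out : Int) : Decidable (Spec_getKoef times timeLimit out) := by unfold Spec_getKoef; infer_instance

-- ===== CLAIM (what is proved, stated in full; the proofs are below) =====
def Claim_equal_getKoef : Prop := ∀ (times : List Int) (timeLimit : Int), Dom_getKoef times timeLimit → Spec_getKoef times timeLimit (getKoef times timeLimit)

-- ===== LEMMAS AND PROOFS =====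

-- proof-only: the selected run, and its position-weighted sum
-- pvSel budget ts = the leading run of tasks that fit the shrinking budget
def pvSel : Int → List Int → List Int
  | _, [] => []
  | budget, t :: rest => if t > budget then [] else t :: pvSel (budget - t) rest

-- wsum l c = Σ_j (c + n - j + 1) * t_j  for l = [t_1, …, t_n]
def pvWsum : List Int → Int → Int
  | [], _ => 0
  | t :: rest, c => (c + rest.length + 1) * t + pvWsum rest c

theorem pvStack_eq (ts : List Int) : ∀ budget stack,
    pvStack budget stack ts = stack ++ pvSel budget ts := by
  induction ts with
  | nil => intro budget stack; simp [pvStack, pvSel]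
  | cons t rest ih =>
    intro budget stack
    simp only [pvStack, pvSel]
    by_cases h : t > budget
    · simp [h]
    · simp [h, ih]

theorem pvWsum_append (l : List Int) (t : Int) : ∀ c,
    pvWsum (l ++ [t]) c = pvWsum l (c + 1) + (c + 1) * t := by
  induction l with
  | nil => intro c; simp [pvWsum]
  | cons x l ih =>
    intro c
    simp only [List.cons_append, pvWsum, List.length_append, List.length_cons,
      List.length_nil, ih]
    push_cast
    ring

theorem pvPopLoop_reverse (l : List Int) : ∀ c s,
    pvPopLoop l.reverse c s = s + 10000 * l.length - pvWsum l c := by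
  induction l using List.reverseRecOn with
  | nil => intro c s; simp [pvPopLoop, pvWsum]
  | append_singleton l t ih =>
    intro c s
    rw [List.reverse_append]
    simp only [List.reverse_cons, List.reverse_nil, List.nil_append, List.singleton_append,
      pvPopLoop, ih, pvWsum_append, List.length_append, List.length_cons, List.length_nil]
    push_cast
    ring

-- A's loop computes the length of the selected run and its prefix-sum penalty,
-- expressed via pvSel and the position-weighted sum
theorem getKoefLoop_eq (timeLimit : Int) (ts : List Int) : ∀ cnt time penalty,
    getKoefLoop timeLimit ts cnt time penalty =
      (cnt + (pvSel (timeLimit - time) ts).length,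
       penalty + time * (pvSel (timeLimit - time) ts).length
         + pvWsum (pvSel (timeLimit - time) ts) 0) := by
  induction ts with
  | nil => intro cnt time penalty; simp [getKoefLoop, pvSel, pvWsum]
  | cons t rest ih =>
    intro cnt time penalty
    simp only [getKoefLoop, pvSel]
    by_cases h : time + t > timeLimit
    · have h' : t > timeLimit - time := by omega
      simp [if_pos h, h', pvWsum]
    · have h' : ¬ t > timeLimit - time := by omega
      have hb : timeLimit - (time + t) = timeLimit - time - t := by ring
      rw [if_neg h, ih, hb, if_neg h']
      have hw : pvWsum (t :: pvSel (timeLimit - time - t) rest) 0 =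
          ((pvSel (timeLimit - time - t) rest).length + 1) * t
            + pvWsum (pvSel (timeLimit - time - t) rest) 0 := by
        simp [pvWsum]
      refine Prod.ext ?_ ?_ <;> simp only [hw, List.length_cons] <;> push_cast <;> ring

-- ===== VERDICT (by name: the statement is the Claim_ definition above) =====
theorem getKoef_spec : Claim_equal_getKoef := by
  intro times timeLimit _
  unfold Spec_getKoef getKoef getKoef_alt
  rw [getKoefLoop_eq, pvStack_eq, List.nil_append, pvPopLoop_reverse]
  simp only [sub_zero]
  ring
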